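-- pv_equiv track=rewrite | github.com/Nghia03092004/nghia03092004.github.io | project_euler_unified/problem_739/solution.py | solve_formula
-- ===== SOURCE A (Python) =====
-- def solve_formula(n):
--     """Formula-based computation using binomial coefficients."""
--     MOD = 10**9 + 7
--
--     # Precompute factorials
--     max_val = 2 * n + 1
--     fact = [1] * max_val
--     for i in range(1, max_val):
--         fact[i] = fact[i-1] * i % MOD
--
--     inv_fact = [1] * max_val
--     inv_fact[max_val - 1] = pow(fact[max_val - 1], MOD - 2, MOD)
--     for i in range(max_val - 2, -1, -1):
--         inv_fact[i] = inv_fact[i+1] * (i+1) % MOD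
--
--     def C(nn, rr):
--         if rr < 0 or rr > nn or nn < 0:
--             return 0
--         return fact[nn] * inv_fact[rr] % MOD * inv_fact[nn - rr] % MOD
--
--     ans = 0
--     L_prev2 = 1  # L_1
--     L_prev1 = 3  # L_2
--
--     ans = C(2*n - 4, n - 2) * L_prev1 % MOD
--
--     for k in range(3, n + 1):
--         L_k = (L_prev1 + L_prev2) % MOD
--         coeff = C(2*n - 2 - k, n - k)
--         ans = (ans + coeff * L_k) % MOD
--         L_prev2 = L_prev1
--         L_prev1 = L_k
--
--     return ans
-- ===== SOURCE B (Python) =====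
-- def solve_formula(n):
--     """Formula-based computation using binomial coefficients."""
--     MOD = 10**9 + 7
--     if n < 2:
--         return 0
--     x = 1
--     for i in range(1, n - 1):
--         x = x * i % MOD                    # x = (n-2)! mod p
--     f = [x]                                # f[j] = (n-2+j)! mod p
--     for j in range(1, n - 1):
--         x = x * (n - 2 + j) % MOD
--         f.append(x)
--     for i in range(2 * n - 3, 2 * n + 1):
--         x = x * i % MOD                    # x = (2n)! mod p
--     t = pow(x, MOD - 2, MOD)
--     for i in range(n - 1, 2 * n + 1):
--         t = t * i % MOD                    # t = anchored inverse of (n-2)!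
--     lp, lc = 1, 3                          # Lucas L_1, L_2
--     ans = f[n - 2] * t % MOD * t % MOD * lc % MOD
--     inv = t                                # running anchored inverse of (n-k)!
--     for k in range(3, n + 1):
--         lp, lc = lc, (lp + lc) % MOD
--         inv = inv * (n - k + 1) % MOD
--         ans = (ans + f[n - k] * inv % MOD * t % MOD * lc) % MOD
--     return ans
-- ===== Notes on version B (the rewrite author's own statement) =====
-- stated objective: alternative
-- what changed: Replaces the two size-(2n+1) factorial/inverse-factorial tables and the C(nn,rr) helper by one size-(n-1) numerator table plus running scalars: a single anchored inverse seeded by one pow and updated multiplicatively as k advances, fused into the summation loop.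
import Mathlib
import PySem

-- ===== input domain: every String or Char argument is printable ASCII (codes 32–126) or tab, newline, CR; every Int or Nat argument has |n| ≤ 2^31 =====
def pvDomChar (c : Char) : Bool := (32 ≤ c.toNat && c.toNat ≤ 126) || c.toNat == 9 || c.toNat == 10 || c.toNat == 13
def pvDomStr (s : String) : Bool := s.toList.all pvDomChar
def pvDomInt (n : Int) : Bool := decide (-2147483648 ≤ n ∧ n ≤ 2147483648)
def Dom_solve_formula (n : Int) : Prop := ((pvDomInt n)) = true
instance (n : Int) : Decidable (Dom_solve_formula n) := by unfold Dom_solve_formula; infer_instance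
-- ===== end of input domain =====

-- B replaces A's two size-(2n+1) factorial / inverse-factorial tables and the C helper by one
-- size-(n-1) numerator table plus running scalars (one anchored inverse seeded by a single pow),
-- fused into the summation loop; same O(n), a different data organisation.

-- ===== PORT A =====
-- hand port of Python's three-argument pow(b, e, m) (used by both Pythons): square-and-multiply,
-- fuel-structural so the kernel and interpreter evaluate it in O(log e) steps; exact for e ≥ 0 and
-- m > 0 (PySem.Int.powMod computes the same value but its evaluation is linear in e — unusable at e ≈ 10^9)
def pvPowModAux (f : Nat) (b : Int) (e : Nat) (m : Int) : Int :=
  match f with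
  | 0 => PySem.Int.mod 1 m
  | f + 1 =>
    if e = 0 then PySem.Int.mod 1 m
    else
      let h := pvPowModAux f b (e / 2) m
      let h2 := PySem.Int.mod (h * h) m
      if e % 2 = 1 then PySem.Int.mod (h2 * b) m else h2

def pvPowMod (b : Int) (e : Nat) (m : Int) : Int := pvPowModAux e b e m

def solve_formula (n : Int) : Int :=
  let MOD : Int := 1000000007
  let max_val : Int := 2 * n + 1
  let fact0 : List Int := List.replicate max_val.toNat 1
  let fact : List Int := (PySem.List.pyRange 1 max_val 1).foldl
    (fun f i => PySem.List.pySetD f i (PySem.Int.mod (PySem.List.pyGetD f (i - 1) 0 * i) MOD)) fact0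
  let inv0 : List Int := List.replicate max_val.toNat 1
  let inv1 : List Int := PySem.List.pySetD inv0 (max_val - 1)
    (pvPowMod (PySem.List.pyGetD fact (max_val - 1) 0) 1000000005 MOD)
  let inv_fact : List Int := (PySem.List.pyRange (max_val - 2) (-1) (-1)).foldl
    (fun f i => PySem.List.pySetD f i (PySem.Int.mod (PySem.List.pyGetD f (i + 1) 0 * (i + 1)) MOD)) inv1
  let C : Int → Int → Int := fun nn rr =>
    if rr < 0 ∨ rr > nn ∨ nn < 0 then 0
    else PySem.Int.mod (PySem.Int.mod (PySem.List.pyGetD fact nn 0 * PySem.List.pyGetD inv_fact rr 0) MOD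
          * PySem.List.pyGetD inv_fact (nn - rr) 0) MOD
  let ans0 : Int := PySem.Int.mod (C (2 * n - 4) (n - 2) * 3) MOD
  let st := (PySem.List.pyRange 3 (n + 1) 1).foldl
    (fun (s : Int × Int × Int) k =>
      let Lk := PySem.Int.mod (s.2.2 + s.2.1) MOD
      let coeff := C (2 * n - 2 - k) (n - k)
      (PySem.Int.mod (s.1 + coeff * Lk) MOD, s.2.2, Lk)) (ans0, 1, 3)
  st.1

-- ===== PORT B =====
def solve_formula_alt (n : Int) : Int :=
  let MOD : Int := 1000000007
  if n < 2 then 0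
  else
    let x0 : Int := (PySem.List.pyRange 1 (n - 1) 1).foldl (fun x i => PySem.Int.mod (x * i) MOD) 1
    let xf : Int × List Int := (PySem.List.pyRange 1 (n - 1) 1).foldl
      (fun (s : Int × List Int) j =>
        let x' := PySem.Int.mod (s.1 * (n - 2 + j)) MOD
        (x', s.2 ++ [x'])) (x0, [x0])
    let x2 : Int := (PySem.List.pyRange (2 * n - 3) (2 * n + 1) 1).foldl
      (fun x i => PySem.Int.mod (x * i) MOD) xf.1
    let t0 : Int := pvPowMod x2 1000000005 MOD
    let t : Int := (PySem.List.pyRange (n - 1) (2 * n + 1) 1).foldl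
      (fun x i => PySem.Int.mod (x * i) MOD) t0
    let f : List Int := xf.2
    let ans0 : Int := PySem.Int.mod (PySem.Int.mod (PySem.Int.mod
      (PySem.List.pyGetD f (n - 2) 0 * t) MOD * t) MOD * 3) MOD
    let st := (PySem.List.pyRange 3 (n + 1) 1).foldl
      (fun (s : Int × Int × Int × Int) k =>
        let lc' := PySem.Int.mod (s.2.1 + s.2.2.1) MOD
        let inv' := PySem.Int.mod (s.2.2.2 * (n - k + 1)) MOD
        (PySem.Int.mod (s.1 + PySem.Int.mod (PySem.Int.mod
            (PySem.List.pyGetD f (n - k) 0 * inv') MOD * t) MOD * lc') MOD,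
          s.2.2.1, lc', inv')) (ans0, 1, 3, t)
    st.1

-- ===== PRECONDITION & SPEC =====
-- Pre_ excludes exactly the inputs on which A raises: for n < 0 the tables are empty and
-- inv_fact[max_val - 1] raises IndexError.
def Pre_solve_formula (n : Int) : Prop := 0 ≤ n
instance (n : Int) : Decidable (Pre_solve_formula n) := by unfold Pre_solve_formula; infer_instance
def pvWitness_solve_formula : Int := (5)

def Spec_solve_formula (n : Int) (out : Int) : Prop := out = solve_formula_alt n
instance (n : Int) (out : Int) : Decidable (Spec_solve_formula n out) := by unfold Spec_solve_formula; infer_instance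

-- ===== CLAIM (what is proved, stated in full; the proofs are below) =====
def Claim_equal_solve_formula : Prop := ∀ (n : Int), Dom_solve_formula n → Pre_solve_formula n → Spec_solve_formula n (solve_formula n)

-- ===== LEMMAS AND PROOFS =====

-- canonical residues: pvFact i = i! mod p; pvAnch = A's single modular-inverse anchor pow((2v)! mod p, p-2, p);
-- pvInvA v d = A's inv_fact[2v-d] (the anchored downward recurrence); pvInv v j = inv_fact[j]
def pvP : Int := 1000000007

def pvFact : Nat → Int
  | 0 => 1
  | i + 1 => PySem.Int.mod (pvFact i * ((i : Int) + 1)) pvP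

def pvAnch (v : Nat) : Int := pvPowMod (pvFact (2 * v)) 1000000005 pvP

def pvInvA (v : Nat) : Nat → Int
  | 0 => pvAnch v
  | d + 1 => PySem.Int.mod (pvInvA v d * ((2 * v : Int) - d)) pvP

def pvInv (v j : Nat) : Int := pvInvA v (2 * v - j)

lemma pvP_pos : (0:Int) < pvP := by norm_num [pvP]

lemma pvInv_step (v c : Nat) (h : c + 1 ≤ 2*v) :
    PySem.Int.mod (pvInv v (c+1) * ((c : Int) + 1)) pvP = pvInv v c := by
  unfold pvInv
  have hd : 2*v - c = (2*v - (c+1)) + 1 := by omega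
  rw [hd]
  show _ = PySem.Int.mod (pvInvA v (2*v - (c+1)) * ((2 * v : Int) - ((2*v - (c+1) : Nat) : Int))) pvP
  have hcast : ((2 * v : Int) - ((2*v - (c+1) : Nat) : Int)) = (c : Int) + 1 := by omega
  rw [hcast]

lemma pvMulmodFold (l : List Int) (hl : l ≠ []) : ∀ (s : Int),
    l.foldl (fun x i => PySem.Int.mod (x * i) pvP) s = (s * l.prod) % pvP := by
  induction l with
  | nil => exact absurd rfl hl
  | cons a t ih =>
      intro s
      simp only [List.foldl_cons]
      rcases t with _ | ⟨b, t'⟩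
      · simp [PySem.Int.mod_eq_emod_of_pos pvP_pos]
      · rw [ih (by simp)]
        rw [PySem.Int.mod_eq_emod_of_pos pvP_pos]
        conv_lhs => rw [Int.mul_emod, Int.emod_emod_of_dvd _ dvd_rfl, ← Int.mul_emod]
        rw [List.prod_cons, ← mul_assoc]
        congr 1
        simp only [List.prod_cons]
        ring

lemma pvInvA_prod (v : Nat) : ∀ d : Nat, 1 ≤ d →
    pvInvA v d = (pvAnch v * ((PySem.List.pyRange ((2*v:Int) - d + 1) (2*(v:Int)+1) 1).prod)) % pvP := by
  intro d
  induction d with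
  | zero => omega
  | succ d ih =>
      intro _
      rcases Nat.eq_zero_or_pos d with h0 | h1
      · subst h0
        show PySem.Int.mod (pvAnch v * ((2 * v : Int) - 0)) pvP = _
        have hr : PySem.List.pyRange ((2*v:Int) - (0+1:Nat) + 1) (2*(v:Int)+1) 1 = [(2*v:Int)] := by
          have : ((2*v:Int) - (0+1:Nat) + 1) = (2*v:Int) := by push_cast; ring
          rw [this]
          have : (2*(v:Int)+1) = (2*v:Int) + 1 := by ring
          rw [this, PySem.List.pyRange_one_singleton]
        rw [hr, PySem.Int.mod_eq_emod_of_pos pvP_pos]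
        simp
      · show PySem.Int.mod (pvInvA v d * ((2 * v : Int) - d)) pvP = _
        rw [ih h1, PySem.Int.mod_eq_emod_of_pos pvP_pos]
        have hr : PySem.List.pyRange ((2*v:Int) - ((d:Nat)+1:Nat) + 1) (2*(v:Int)+1) 1
            = ((2*v:Int) - d) :: PySem.List.pyRange ((2*v:Int) - d + 1) (2*(v:Int)+1) 1 := by
          have h1' : ((2*v:Int) - ((d:Nat)+1:Nat) + 1) = (2*v:Int) - d := by push_cast; ring
          rw [h1', PySem.List.pyRange_one_cons (by omega)]
        rw [hr, List.prod_cons]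
        conv_lhs => rw [Int.mul_emod, Int.emod_emod_of_dvd _ dvd_rfl, ← Int.mul_emod]
        ring_nf

lemma pvB_mulfold (m r : Nat) :
    (PySem.List.pyRange ((m : Int) + 1) ((m : Int) + 1 + r) 1).foldl
      (fun x i => PySem.Int.mod (x * i) pvP) (pvFact m) = pvFact (m + r) := by
  induction r with
  | zero => simp
  | succ r ih =>
      have h1 : ((m : Int) + 1 + ((r:Nat)+1 : Nat)) = ((m:Int)+1+r) + 1 := by push_cast; ring
      rw [h1, PySem.List.pyRange_one_succ_right (by omega), List.foldl_append, ih]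
      show PySem.Int.mod (pvFact (m+r) * ((m:Int)+1+r)) pvP = pvFact (m + (r+1))
      have h2 : m + (r+1) = (m+r) + 1 := by omega
      rw [h2]
      show _ = PySem.Int.mod (pvFact (m+r) * (((m+r:Nat) : Int) + 1)) pvP
      push_cast; ring_nf

lemma pvB_table_aux (v : Nat) (h2 : 2 ≤ v) (r : Nat) :
    (PySem.List.pyRange 1 (1 + (r:Int)) 1).foldl
      (fun (s : Int × List Int) j =>
        let x' := PySem.Int.mod (s.1 * ((v : Int) - 2 + j)) pvP
        (x', s.2 ++ [x'])) (pvFact (v - 2), [pvFact (v - 2)])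
    = (pvFact (v - 2 + r), (List.range (r + 1)).map (fun j => pvFact (v - 2 + j))) := by
  induction r with
  | zero => simp
  | succ r ih =>
      have h1 : (1 + ((r:Nat)+1 : Nat) : Int) = (1 + (r:Int)) + 1 := by push_cast; ring
      rw [h1, PySem.List.pyRange_one_succ_right (by omega), List.foldl_append, ih]
      simp only [List.foldl, Prod.mk.injEq]
      refine ⟨?_, ?_⟩
      · show PySem.Int.mod (pvFact (v-2+r) * ((v:Int) - 2 + (1 + r))) pvP = pvFact (v - 2 + (r+1))
        have h2 : v - 2 + (r + 1) = (v - 2 + r) + 1 := by omega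
        rw [h2]
        show _ = PySem.Int.mod (pvFact (v-2+r) * (((v-2+r:Nat) : Int) + 1)) pvP
        have h3 : ((v - 2 + r : Nat) : Int) = (v:Int) - 2 + r := by
          push_cast [Nat.cast_sub (by omega : 2 ≤ v)]; ring
        rw [h3]; ring_nf
      · show _ ++ [PySem.Int.mod (pvFact (v-2+r) * ((v:Int) - 2 + (1 + r))) pvP] = _
        rw [List.range_succ (n := r + 1), List.map_append]
        congr 1
        simp only [List.map_cons, List.map_nil]
        congr 1
        have h2 : v - 2 + (r + 1) = (v - 2 + r) + 1 := by omega
        rw [h2]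
        show _ = pvFact ((v-2+r)+1)
        show _ = PySem.Int.mod (pvFact (v-2+r) * (((v-2+r:Nat) : Int) + 1)) pvP
        have h3 : ((v - 2 + r : Nat) : Int) = (v:Int) - 2 + r := by
          push_cast [Nat.cast_sub (by omega : 2 ≤ v)]; ring
        rw [h3]; ring_nf

lemma pvA_fact_aux (v : Nat) : ∀ b : Nat, b ≤ 2*v →
    (PySem.List.pyRange 1 (1 + (b:Int)) 1).foldl
      (fun f i => PySem.List.pySetD f i (PySem.Int.mod (PySem.List.pyGetD f (i - 1) 0 * i) pvP))
      (List.replicate (2 * (v : Int) + 1).toNat 1)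
    = (List.range (2 * v + 1)).map (fun j => if j ≤ b then pvFact j else 1) := by
  intro b
  induction b with
  | zero =>
      intro _
      have hN : (2 * (v : Int) + 1).toNat = 2 * v + 1 := by omega
      have h0 : (1 + ((0:Nat):Int)) = 1 := by norm_num
      rw [h0, PySem.List.pyRange_one_eq_nil le_rfl, List.foldl_nil, hN]
      apply List.ext_getElem
      · simp
      · intro i h1' h2'
        simp only [List.getElem_replicate, List.getElem_map, List.getElem_range]
        by_cases hi : i ≤ 0
        · have : i = 0 := by omega
          subst this
          rw [if_pos le_rfl]; rfl
        · rw [if_neg hi]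
  | succ b ih =>
      intro hb
      have h1 : (1 + ((b:Nat)+1 : Nat) : Int) = (1 + (b:Int)) + 1 := by push_cast; ring
      rw [h1, PySem.List.pyRange_one_succ_right (by omega), List.foldl_append, ih (by omega)]
      simp only [List.foldl]
      have hb1 : ((1:Int) + b) - 1 = ((b:Nat) : Int) := by ring
      rw [hb1, PySem.List.pyGetD_natCast, PySem.List.getD_map_range _ _ _ _ (by omega)]
      have hset : ((1:Int) + (b:Int)) = (((b+1 : Nat)) : Int) := by push_cast; ring
      rw [hset, PySem.List.pySetD_of_nonneg _ _ (Int.natCast_nonneg _)]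
      have htn : (((b+1:Nat)):Int).toNat = b + 1 := by omega
      rw [htn]
      apply List.ext_getElem
      · simp
      · intro i h1' h2'
        simp only [List.getElem_set, List.getElem_map, List.getElem_range]
        have hi : i < 2*v+1 := by simpa using h1'
        by_cases hib : i = b + 1
        · subst hib
          rw [if_pos rfl, if_pos (le_refl (b+1)), if_pos (le_refl b)]
          show _ = pvFact (b+1)
          show _ = PySem.Int.mod (pvFact b * ((b : Int) + 1)) pvP
          push_cast; ring_nf
        · rw [if_neg (fun h => hib h.symm)]
          by_cases hle : i ≤ b
          · rw [if_pos hle, if_pos (by omega)]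
          · rw [if_neg hle, if_neg (by omega)]

lemma pvA_inv_aux (v : Nat) : ∀ c : Nat, c ≤ 2*v →
    (PySem.List.pyRange ((c:Int) - 1) (-1) (-1)).foldl
      (fun f i => PySem.List.pySetD f i (PySem.Int.mod (PySem.List.pyGetD f (i + 1) 0 * (i + 1)) pvP))
      ((List.range (2 * v + 1)).map (fun j => if c ≤ j then pvInv v j else 1))
    = (List.range (2 * v + 1)).map (pvInv v) := by
  intro c
  induction c with
  | zero =>
      intro _
      rw [PySem.List.pyRange_neg_one_eq_nil (by norm_num), List.foldl_nil]
      apply List.map_congr_left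
      intro j _
      rw [if_pos (Nat.zero_le j)]
  | succ c ih =>
      intro hc
      have h1 : ((c+1 : Nat) : Int) - 1 = (c : Int) := by push_cast; ring
      rw [h1, PySem.List.pyRange_neg_one_cons (by omega), List.foldl_cons]
      have hgd : PySem.List.pyGetD
          ((List.range (2 * v + 1)).map (fun j => if c + 1 ≤ j then pvInv v j else 1)) ((c:Int) + 1) 0
          = pvInv v (c + 1) := by
        rw [show ((c:Int) + 1) = (((c+1 : Nat)) : Int) from by push_cast; ring,
          PySem.List.pyGetD_natCast, PySem.List.getD_map_range _ _ _ _ (by omega)]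
        rw [if_pos le_rfl]
      rw [hgd]
      rw [pvInv_step v c (by omega)]
      rw [PySem.List.pySetD_of_nonneg _ _ (Int.natCast_nonneg c), Int.toNat_natCast]
      have hstep : ((List.range (2 * v + 1)).map (fun j => if c + 1 ≤ j then pvInv v j else 1)).set c (pvInv v c)
          = (List.range (2 * v + 1)).map (fun j => if c ≤ j then pvInv v j else 1) := by
        apply List.ext_getElem
        · simp
        · intro i h1' h2'
          simp only [List.getElem_set, List.getElem_map, List.getElem_range]
          by_cases hic : c = i
          · subst hic
            rw [if_pos rfl, if_pos le_rfl]
          · rw [if_neg hic]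
            by_cases hle : c + 1 ≤ i
            · rw [if_pos hle, if_pos (by omega)]
            · rw [if_neg hle, if_neg (by omega)]
      rw [hstep]
      exact ih (by omega)

lemma pvB_t (v : Nat) (h2 : 2 ≤ v) :
    (PySem.List.pyRange ((v : Int) - 1) (2 * (v : Int) + 1) 1).foldl
      (fun x i => PySem.Int.mod (x * i) pvP) (pvAnch v) = pvInv v (v - 2) := by
  have hne : PySem.List.pyRange ((v : Int) - 1) (2 * (v : Int) + 1) 1 ≠ [] := by
    rw [PySem.List.pyRange_one_cons (by omega)]; simp
  rw [pvMulmodFold _ hne]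
  have hd : 2 * v - (v - 2) = v + 2 := by omega
  unfold pvInv
  rw [hd, pvInvA_prod v (v+2) (by omega)]
  congr 2
  push_cast; ring

lemma pvA_fact (v : Nat) :
    (PySem.List.pyRange 1 (2 * (v : Int) + 1) 1).foldl
      (fun f i => PySem.List.pySetD f i (PySem.Int.mod (PySem.List.pyGetD f (i - 1) 0 * i) pvP))
      (List.replicate (2 * (v : Int) + 1).toNat 1)
    = (List.range (2 * v + 1)).map pvFact := by
  have haux := pvA_fact_aux v (2*v) (le_refl _)
  rw [show (1 + ((2*v : Nat) : Int)) = 2 * (v : Int) + 1 from by push_cast; ring] at haux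
  rw [haux]
  apply List.map_congr_left
  intro j hj
  rw [if_pos (by simpa using Nat.lt_succ_iff.mp (List.mem_range.mp hj))]

lemma pvA_inv (v : Nat) :
    (PySem.List.pyRange (2 * (v : Int) - 1) (-1) (-1)).foldl
      (fun f i => PySem.List.pySetD f i (PySem.Int.mod (PySem.List.pyGetD f (i + 1) 0 * (i + 1)) pvP))
      (PySem.List.pySetD (List.replicate (2 * (v : Int) + 1).toNat 1) (2 * (v : Int))
        (pvPowMod (PySem.List.pyGetD ((List.range (2 * v + 1)).map pvFact) (2 * (v : Int)) 0) 1000000005 pvP))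
    = (List.range (2 * v + 1)).map (pvInv v) := by
  have hstart : PySem.List.pySetD (List.replicate (2 * (v : Int) + 1).toNat 1) (2 * (v : Int))
        (pvPowMod (PySem.List.pyGetD ((List.range (2 * v + 1)).map pvFact) (2 * (v : Int)) 0) 1000000005 pvP)
      = (List.range (2 * v + 1)).map (fun j => if 2*v ≤ j then pvInv v j else 1) := by
    have hg : PySem.List.pyGetD ((List.range (2 * v + 1)).map pvFact) (2 * (v : Int)) 0 = pvFact (2*v) := by
      rw [show (2 * (v : Int)) = ((2*v : Nat) : Int) from by push_cast; ring,
        PySem.List.pyGetD_natCast, PySem.List.getD_map_range _ _ _ _ (by omega)]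
    rw [hg]
    rw [show (2 * (v : Int)) = ((2*v : Nat) : Int) from by push_cast; ring,
      PySem.List.pySetD_of_nonneg _ _ (Int.natCast_nonneg _), Int.toNat_natCast]
    have hN : (((2*v : Nat) : Int) + 1).toNat = 2 * v + 1 := by omega
    rw [hN]
    apply List.ext_getElem
    · simp
    · intro i h1' h2'
      simp only [List.getElem_set, List.getElem_replicate, List.getElem_map, List.getElem_range]
      have hi : i < 2*v+1 := by simpa using h2'
      by_cases hic : 2*v = i
      · subst hic
        rw [if_pos rfl, if_pos le_rfl]
        show pvPowMod (pvFact (2*v)) 1000000005 pvP = pvInv v (2*v)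
        unfold pvInv
        rw [Nat.sub_self]
        rfl
      · rw [if_neg hic, if_neg (by omega)]
  rw [hstart]
  have haux := pvA_inv_aux v (2*v) le_rfl
  rw [show (((2*v : Nat)) : Int) - 1 = 2 * (v : Int) - 1 from by push_cast; ring] at haux
  exact haux

lemma pvLoopGen (v : Nat) (cA g : Int → Int) (T a0 : Int)
    (hc : ∀ k : Int, 3 ≤ k → k ≤ (v : Int) →
      cA k = PySem.Int.mod (PySem.Int.mod (g k * pvInv v (v - k.toNat)) pvP * T) pvP)
    (hstep : ∀ k : Int, 3 ≤ k → k ≤ (v : Int) →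
      PySem.Int.mod (pvInv v (v - (k.toNat - 1)) * ((v : Int) - k + 1)) pvP = pvInv v (v - k.toNat)) :
    ∀ d : Nat, 3 + (d : Int) ≤ (v : Int) + 1 →
    (((PySem.List.pyRange 3 (3 + (d : Int)) 1).foldl
        (fun (s : Int × Int × Int) k =>
          (PySem.Int.mod (s.1 + cA k * PySem.Int.mod (s.2.2 + s.2.1) pvP) pvP, s.2.2,
            PySem.Int.mod (s.2.2 + s.2.1) pvP)) (a0, 1, 3)).1
      = ((PySem.List.pyRange 3 (3 + (d : Int)) 1).foldl
        (fun (s : Int × Int × Int × Int) k =>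
          (PySem.Int.mod (s.1 + PySem.Int.mod (PySem.Int.mod
              (g k * PySem.Int.mod (s.2.2.2 * ((v : Int) - k + 1)) pvP) pvP * T) pvP
              * PySem.Int.mod (s.2.1 + s.2.2.1) pvP) pvP,
            s.2.2.1, PySem.Int.mod (s.2.1 + s.2.2.1) pvP,
            PySem.Int.mod (s.2.2.2 * ((v : Int) - k + 1)) pvP)) (a0, 1, 3, pvInv v (v - 2))).1)
    ∧ (((PySem.List.pyRange 3 (3 + (d : Int)) 1).foldl
        (fun (s : Int × Int × Int) k =>
          (PySem.Int.mod (s.1 + cA k * PySem.Int.mod (s.2.2 + s.2.1) pvP) pvP, s.2.2,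
            PySem.Int.mod (s.2.2 + s.2.1) pvP)) (a0, 1, 3)).2.1
      = ((PySem.List.pyRange 3 (3 + (d : Int)) 1).foldl
        (fun (s : Int × Int × Int × Int) k =>
          (PySem.Int.mod (s.1 + PySem.Int.mod (PySem.Int.mod
              (g k * PySem.Int.mod (s.2.2.2 * ((v : Int) - k + 1)) pvP) pvP * T) pvP
              * PySem.Int.mod (s.2.1 + s.2.2.1) pvP) pvP,
            s.2.2.1, PySem.Int.mod (s.2.1 + s.2.2.1) pvP,
            PySem.Int.mod (s.2.2.2 * ((v : Int) - k + 1)) pvP)) (a0, 1, 3, pvInv v (v - 2))).2.1)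
    ∧ (((PySem.List.pyRange 3 (3 + (d : Int)) 1).foldl
        (fun (s : Int × Int × Int) k =>
          (PySem.Int.mod (s.1 + cA k * PySem.Int.mod (s.2.2 + s.2.1) pvP) pvP, s.2.2,
            PySem.Int.mod (s.2.2 + s.2.1) pvP)) (a0, 1, 3)).2.2
      = ((PySem.List.pyRange 3 (3 + (d : Int)) 1).foldl
        (fun (s : Int × Int × Int × Int) k =>
          (PySem.Int.mod (s.1 + PySem.Int.mod (PySem.Int.mod
              (g k * PySem.Int.mod (s.2.2.2 * ((v : Int) - k + 1)) pvP) pvP * T) pvP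
              * PySem.Int.mod (s.2.1 + s.2.2.1) pvP) pvP,
            s.2.2.1, PySem.Int.mod (s.2.1 + s.2.2.1) pvP,
            PySem.Int.mod (s.2.2.2 * ((v : Int) - k + 1)) pvP)) (a0, 1, 3, pvInv v (v - 2))).2.2.1)
    ∧ (((PySem.List.pyRange 3 (3 + (d : Int)) 1).foldl
        (fun (s : Int × Int × Int × Int) k =>
          (PySem.Int.mod (s.1 + PySem.Int.mod (PySem.Int.mod
              (g k * PySem.Int.mod (s.2.2.2 * ((v : Int) - k + 1)) pvP) pvP * T) pvP
              * PySem.Int.mod (s.2.1 + s.2.2.1) pvP) pvP,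
            s.2.2.1, PySem.Int.mod (s.2.1 + s.2.2.1) pvP,
            PySem.Int.mod (s.2.2.2 * ((v : Int) - k + 1)) pvP)) (a0, 1, 3, pvInv v (v - 2))).2.2.2
        = pvInv v (v - (2 + d))) := by
  intro d
  induction d with
  | zero =>
      intro _
      rw [show (3 + ((0:Nat) : Int)) = 3 from by norm_num, PySem.List.pyRange_one_eq_nil le_rfl]
      simp only [List.foldl_nil]
      exact ⟨trivial, trivial, trivial, by simp⟩
  | succ d ih =>
      intro hd
      have hk3 : (3 : Int) ≤ 3 + (d : Int) := by omega
      have hkv : 3 + (d : Int) ≤ (v : Int) := by push_cast at hd ⊢; omega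
      have hb : (3 + ((d+1 : Nat) : Int)) = (3 + (d : Int)) + 1 := by push_cast; ring
      rw [hb, PySem.List.pyRange_one_succ_right hk3, List.foldl_append, List.foldl_append]
      obtain ⟨ih1, ih2, ih3, ih4⟩ := ih (by omega)
      simp only [List.foldl_cons, List.foldl_nil]
      set SA := (PySem.List.pyRange 3 (3 + (d : Int)) 1).foldl
        (fun (s : Int × Int × Int) k =>
          (PySem.Int.mod (s.1 + cA k * PySem.Int.mod (s.2.2 + s.2.1) pvP) pvP, s.2.2,
            PySem.Int.mod (s.2.2 + s.2.1) pvP)) (a0, 1, 3) with hSA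
      set SB := (PySem.List.pyRange 3 (3 + (d : Int)) 1).foldl
        (fun (s : Int × Int × Int × Int) k =>
          (PySem.Int.mod (s.1 + PySem.Int.mod (PySem.Int.mod
              (g k * PySem.Int.mod (s.2.2.2 * ((v : Int) - k + 1)) pvP) pvP * T) pvP
              * PySem.Int.mod (s.2.1 + s.2.2.1) pvP) pvP,
            s.2.2.1, PySem.Int.mod (s.2.1 + s.2.2.1) pvP,
            PySem.Int.mod (s.2.2.2 * ((v : Int) - k + 1)) pvP)) (a0, 1, 3, pvInv v (v - 2)) with hSB
      have htoNat : (3 + (d : Int)).toNat = 3 + d := by omega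
      have hLk : PySem.Int.mod (SA.2.2 + SA.2.1) pvP = PySem.Int.mod (SB.2.1 + SB.2.2.1) pvP := by
        rw [ih2, ih3, add_comm]
      have hinv : PySem.Int.mod (SB.2.2.2 * ((v : Int) - (3 + (d : Int)) + 1)) pvP
          = pvInv v (v - (3 + d)) := by
        rw [ih4]
        have h := hstep (3 + (d : Int)) hk3 hkv
        rw [htoNat] at h
        rw [show (3 + d - 1) = 2 + d from by omega] at h
        exact h
      refine ⟨?_, ih3, hLk, ?_⟩
      · rw [ih1, hLk, hinv, hc (3 + (d : Int)) hk3 hkv, htoNat]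
      · rw [hinv]; congr 1; omega

lemma pvMain (v : Nat) (h2 : 2 ≤ v) :
    solve_formula (v : Int) = solve_formula_alt (v : Int) := by
  unfold solve_formula solve_formula_alt
  rw [if_neg (by omega : ¬ ((v:Int) < 2))]
  rw [show (1000000007 : Int) = pvP from rfl]
  simp only []
  rw [show (2*(v:Int)+1-1) = 2*(v:Int) from by ring]
  rw [show (2*(v:Int)+1-2) = 2*(v:Int)-1 from by ring]
  rw [pvA_fact v, pvA_inv v]
  have hx0 : (PySem.List.pyRange 1 ((v:Int)-1) 1).foldl
      (fun x i => PySem.Int.mod (x * i) pvP) 1 = pvFact (v-2) := by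
    have h := pvB_mulfold 0 (v-2)
    rw [show pvFact 0 = 1 from rfl] at h
    rw [show ((0:Nat):Int)+1 = 1 from by norm_num] at h
    rw [show (1 + ((v-2:Nat):Int)) = (v:Int)-1 from by omega] at h
    rw [show 0+(v-2) = v-2 from by omega] at h
    exact h
  rw [hx0]
  have hxf := pvB_table_aux v h2 (v-2)
  rw [show (1 + ((v-2:Nat):Int)) = (v:Int)-1 from by omega] at hxf
  rw [show v-2+(v-2) = 2*v-4 from by omega] at hxf
  rw [show v-2+1 = v-1 from by omega] at hxf
  rw [hxf]
  dsimp only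
  have hx2 : (PySem.List.pyRange (2*(v:Int)-3) (2*(v:Int)+1) 1).foldl
      (fun x i => PySem.Int.mod (x * i) pvP) (pvFact (2*v-4)) = pvFact (2*v) := by
    have h := pvB_mulfold (2*v-4) 4
    rw [show ((2*v-4:Nat):Int) = 2*(v:Int)-4 from by omega] at h
    rw [show (2*(v:Int)-4+1) = 2*(v:Int)-3 from by ring] at h
    rw [show (2*(v:Int)-3+((4:Nat):Int)) = 2*(v:Int)+1 from by push_cast; ring] at h
    rw [show 2*v-4+4 = 2*v from by omega] at h
    exact h
  rw [hx2]
  rw [show pvPowMod (pvFact (2*v)) 1000000005 pvP = pvAnch v from rfl]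
  rw [pvB_t v h2]
  -- seed lookups
  rw [show (2*(v:Int)-4-((v:Int)-2)) = (v:Int)-2 from by ring]
  rw [show (2*(v:Int)-4) = ((2*v-4:Nat):Int) from by omega]
  rw [show ((v:Int)-2) = ((v-2:Nat):Int) from by omega]
  rw [if_neg (by omega)]
  simp only [PySem.List.pyGetD_natCast]
  rw [PySem.List.getD_map_range pvFact _ _ _ (by omega)]
  rw [PySem.List.getD_map_range (pvInv v) _ _ _ (by omega)]
  rw [PySem.List.getD_map_range (fun j => pvFact (v-2+j)) _ _ _ (by omega)]
  rw [show v-2+(v-2) = 2*v-4 from by omega]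
  rw [show ((v:Int)+1) = 3 + ((v-2:Nat):Int) from by omega]
  refine (pvLoopGen v
    (fun k => if (v:Int) - k < 0 ∨ (v:Int) - k > 2*(v:Int)-2-k ∨ 2*(v:Int)-2-k < 0 then (0:Int)
      else PySem.Int.mod (PySem.Int.mod
        (PySem.List.pyGetD ((List.range (2*v+1)).map pvFact) (2*(v:Int)-2-k) 0
          * PySem.List.pyGetD ((List.range (2*v+1)).map (pvInv v)) ((v:Int)-k) 0) pvP
        * PySem.List.pyGetD ((List.range (2*v+1)).map (pvInv v)) (2*(v:Int)-2-k-((v:Int)-k)) 0) pvP)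
    (fun k => PySem.List.pyGetD ((List.range (v-1)).map (fun j => pvFact (v-2+j))) ((v:Int)-k) 0)
    (pvInv v (v-2))
    (PySem.Int.mod (PySem.Int.mod (PySem.Int.mod (pvFact (2*v-4) * pvInv v (v-2)) pvP
      * pvInv v (v-2)) pvP * 3) pvP)
    ?_ ?_ (v-2) (by omega)).1
  · intro k hk3 hkv
    obtain ⟨κ, rfl⟩ : ∃ κ : Nat, k = (κ : Int) := ⟨k.toNat, by omega⟩
    have hκ3 : 3 ≤ κ := by exact_mod_cast hk3
    have hκv : κ ≤ v := by exact_mod_cast hkv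
    simp only []
    rw [if_neg (by omega)]
    rw [show (2*(v:Int)-2-(κ:Int)-((v:Int)-(κ:Int))) = (v:Int)-2 from by ring]
    rw [show (2*(v:Int)-2-(κ:Int)) = ((2*v-2-κ:Nat):Int) from by omega]
    rw [show ((v:Int)-(κ:Int)) = ((v-κ:Nat):Int) from by omega]
    rw [show ((v:Int)-2) = ((v-2:Nat):Int) from by omega]
    simp only [PySem.List.pyGetD_natCast]
    rw [PySem.List.getD_map_range pvFact _ _ _ (by omega)]
    rw [PySem.List.getD_map_range (pvInv v) _ _ _ (by omega)]
    rw [PySem.List.getD_map_range (pvInv v) _ _ _ (by omega)]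
    rw [PySem.List.getD_map_range (fun j => pvFact (v-2+j)) _ _ _ (by omega)]
    rw [Int.toNat_natCast]
    rw [show v-2+(v-κ) = 2*v-2-κ from by omega]
  · intro k hk3 hkv
    obtain ⟨κ, rfl⟩ : ∃ κ : Nat, k = (κ : Int) := ⟨k.toNat, by omega⟩
    have hκ3 : 3 ≤ κ := by exact_mod_cast hk3
    have hκv : κ ≤ v := by exact_mod_cast hkv
    rw [Int.toNat_natCast]
    rw [show v - (κ-1) = (v-κ)+1 from by omega]
    have h := pvInv_step v (v-κ) (by omega)
    rw [show (((v-κ:Nat)):Int)+1 = (v:Int)-(κ:Int)+1 from by omega] at h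
    exact h

-- ===== VERDICT (by name: the statement is the Claim_ definition above) =====
theorem solve_formula_spec : Claim_equal_solve_formula := by
  intro n _ hpre
  unfold Spec_solve_formula
  have h0 : n = 0 ∨ n = 1 ∨ 2 ≤ n := by
    unfold Pre_solve_formula at hpre; omega
  rcases h0 with h | h | h
  · subst h; decide
  · subst h; decide
  · obtain ⟨v, rfl⟩ : ∃ v : Nat, n = (v : Int) := ⟨n.toNat, by omega⟩
    exact pvMain v (by exact_mod_cast h)
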